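-- pv_equiv track=rewrite | github.com/azraeltruthsay/gaia | gaia-core/gaia_core/utils/world_state.py | _capability_affordances
-- ===== SOURCE A (Python) =====
-- from typing import Dict, List
--
-- def _capability_affordances(tools: List[str]) -> List[str]:
--     """
--     Generate natural-language capability hints based on available tools.
--
--     This is intentionally fuzzy/semantic rather than keyword-matching.
--     The goal is to help GAIA understand what she *can* do, not prescribe
--     exact invocations.
--     """
--     affordances = []
--
--     # File exploration capabilities
--     file_tools = [t for t in tools if any(w in t.lower() for w in ['file', 'dir', 'tree', 'find', 'read', 'list'])]
--     if file_tools: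
--         affordances.append(
--             "You can explore your own codebase and knowledge files—search by name, "
--             "browse directories, or read documents to answer questions about yourself."
--         )
--
--     # Memory/semantic search capabilities
--     memory_tools = [t for t in tools if 'memory' in t.lower() or 'query' in t.lower()]
--     if memory_tools:
--         affordances.append(
--             "You have semantic memory—you can search your indexed knowledge for concepts, "
--             "not just filenames."
--         )
--
--     # Write capabilities
--     write_tools = [t for t in tools if 'write' in t.lower()]
--     if write_tools:
--         affordances.append(
--             "You can write files (with operator approval) to persist thoughts, notes, or outputs."
--         )
--
--     return affordances
-- ===== SOURCE B (Python) =====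
-- def _capability_affordances(tools):
--     """Single pass over tools maintaining three booleans, then emit hints in fixed order."""
--     has_file = False
--     has_memory = False
--     has_write = False
--     for t in tools:
--         tl = t.lower()
--         if any(w in tl for w in ['file', 'dir', 'tree', 'find', 'read', 'list']):
--             has_file = True
--         if 'memory' in tl or 'query' in tl:
--             has_memory = True
--         if 'write' in tl:
--             has_write = True
--     out = []
--     if has_file:
--         out.append(
--             "You can explore your own codebase and knowledge files—search by name, "
--             "browse directories, or read documents to answer questions about yourself."
--         )
--     if has_memory:
--         out.append(
--             "You have semantic memory—you can search your indexed knowledge for concepts, "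
--             "not just filenames."
--         )
--     if has_write:
--         out.append(
--             "You can write files (with operator approval) to persist thoughts, notes, or outputs."
--         )
--     return out
-- ===== Notes on version B (the rewrite author's own statement) =====
-- stated objective: alternative
-- what changed: Replaced the three per-keyword-group list comprehensions (three passes building throwaway lists) by a single pass over tools maintaining three booleans, then emitting the hint strings in the fixed file/memory/write order.
import Mathlib
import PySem

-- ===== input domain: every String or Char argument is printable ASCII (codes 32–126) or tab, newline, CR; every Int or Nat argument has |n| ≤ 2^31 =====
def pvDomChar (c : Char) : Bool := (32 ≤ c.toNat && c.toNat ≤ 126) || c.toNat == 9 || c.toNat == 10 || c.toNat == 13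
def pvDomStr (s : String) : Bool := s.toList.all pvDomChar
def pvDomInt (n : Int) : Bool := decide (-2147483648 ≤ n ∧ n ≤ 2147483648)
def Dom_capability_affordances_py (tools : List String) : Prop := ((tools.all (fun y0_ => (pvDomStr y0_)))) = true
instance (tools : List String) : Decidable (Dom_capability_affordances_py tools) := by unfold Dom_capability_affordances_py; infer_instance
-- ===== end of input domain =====

-- B replaces A's three list-building comprehensions by one pass keeping three booleans;
-- same return value, different decomposition (objective: alternative).

-- the three hint strings (shared literals)
def hintFile : String :=
  "You can explore your own codebase and knowledge files—search by name, browse directories, or read documents to answer questions about yourself."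
def hintMemory : String :=
  "You have semantic memory—you can search your indexed knowledge for concepts, not just filenames."
def hintWrite : String :=
  "You can write files (with operator approval) to persist thoughts, notes, or outputs."

def fileKeywords : List String := ["file", "dir", "tree", "find", "read", "list"]

-- ===== PORT A =====
def capability_affordances_py (tools : List String) : List String :=
  let affordances : List String := []
  let file_tools := tools.filter (fun t => fileKeywords.any (fun w => PySem.Str.isIn w (PySem.Str.lower t)))
  let affordances := if file_tools.isEmpty then affordances else affordances ++ [hintFile]
  let memory_tools := tools.filter (fun t => PySem.Str.isIn "memory" (PySem.Str.lower t) || PySem.Str.isIn "query" (PySem.Str.lower t))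
  let affordances := if memory_tools.isEmpty then affordances else affordances ++ [hintMemory]
  let write_tools := tools.filter (fun t => PySem.Str.isIn "write" (PySem.Str.lower t))
  let affordances := if write_tools.isEmpty then affordances else affordances ++ [hintWrite]
  affordances

-- ===== PORT B =====
def capability_affordances_py_alt (tools : List String) : List String :=
  let flags := tools.foldl (fun st t =>
      let tl := PySem.Str.lower t
      let st := if fileKeywords.any (fun w => PySem.Str.isIn w tl) then (true, st.2.1, st.2.2) else st
      let st := if PySem.Str.isIn "memory" tl || PySem.Str.isIn "query" tl then (st.1, true, st.2.2) else st
      let st := if PySem.Str.isIn "write" tl then (st.1, st.2.1, true) else st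
      st) (false, false, false)
  let out : List String := []
  let out := if flags.1 then out ++ [hintFile] else out
  let out := if flags.2.1 then out ++ [hintMemory] else out
  let out := if flags.2.2 then out ++ [hintWrite] else out
  out

-- ===== PRECONDITION & SPEC =====
def Spec_capability_affordances_py (tools : List String) (out : List String) : Prop := out = capability_affordances_py_alt tools
instance (tools : List String) (out : List String) : Decidable (Spec_capability_affordances_py tools out) := by unfold Spec_capability_affordances_py; infer_instance

-- ===== CLAIM (what is proved, stated in full; the proofs are below) =====
def Claim_equal_capability_affordances_py : Prop := ∀ (tools : List String), Dom_capability_affordances_py tools → Spec_capability_affordances_py tools (capability_affordances_py tools)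

-- ===== LEMMAS AND PROOFS =====

-- B's triple-boolean fold computes the three `any`s of the per-tool predicates
theorem flags_foldl (p1 p2 p3 : String → Bool) (tools : List String) (a b c : Bool) :
    tools.foldl (fun st t =>
        let st := if p1 t then (true, st.2.1, st.2.2) else st
        let st := if p2 t then (st.1, true, st.2.2) else st
        let st := if p3 t then (st.1, st.2.1, true) else st
        st) (a, b, c)
      = (a || tools.any p1, b || tools.any p2, c || tools.any p3) := by
  induction tools generalizing a b c with
  | nil => simp
  | cons t ts ih =>
    simp only [List.foldl_cons, List.any_cons]
    by_cases h1 : p1 t <;> by_cases h2 : p2 t <;> by_cases h3 : p3 t <;>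
      simp [h1, h2, h3, ih]

-- A's truthiness test on a comprehension is the `any` of its predicate
theorem filter_isEmpty_eq (p : String → Bool) (tools : List String) :
    (tools.filter p).isEmpty = !tools.any p := by
  induction tools with
  | nil => simp
  | cons t ts ih => by_cases h : p t <;> simp [h, ih]

-- ===== VERDICT (by name: the statement is the Claim_ definition above) =====
theorem capability_affordances_py_spec : Claim_equal_capability_affordances_py := by
  intro tools _
  show capability_affordances_py tools = capability_affordances_py_alt tools
  unfold capability_affordances_py capability_affordances_py_alt
  rw [flags_foldl]
  simp only [filter_isEmpty_eq, Bool.false_or]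
  cases hb1 : tools.any (fun t => fileKeywords.any (fun w => PySem.Str.isIn w (PySem.Str.lower t))) <;>
  cases hb2 : tools.any (fun t => PySem.Str.isIn "memory" (PySem.Str.lower t) || PySem.Str.isIn "query" (PySem.Str.lower t)) <;>
  cases hb3 : tools.any (fun t => PySem.Str.isIn "write" (PySem.Str.lower t)) <;>
    (try simp only [hb1, hb2, hb3]) <;> rfl
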